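-- pv_equiv track=rewrite | github.com/AEPForGTE/ILLOD | ILLOD_IST/Function_Pool.py | generate_containment_list
-- ===== SOURCE A (Python) =====
-- def generate_containment_list(t, positions_of_char_from_a_in_t):
--     splitted_term = t.split()
--     term_intervals = []
--     len_of_term = len(t)
--     i = 0
--     while i < len_of_term:
--         sublist = []
--         j = i
--         while j < len_of_term and t[j] != " ":
--             sublist.append(j)
--             j = j+ 1
--         i = j+1
--         term_intervals.append(sublist)
--
--     containment_list = []
--     for i, interval in enumerate(term_intervals):
--         contanment_sublist = []
--         for j, pos in enumerate(positions_of_char_from_a_in_t):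
--             if (pos in interval) and (splitted_term[i][0].lower() == t[pos].lower()) and j==0:
--                 contanment_sublist.append(0)
--             elif (pos in interval) and (splitted_term[i][:2] == "x_" and t[pos] == "e"):
--                 contanment_sublist.append(0)
--             elif pos in interval:
--                 contanment_sublist.append(interval.index(pos))
--         if len(contanment_sublist) == 0:
--             contanment_sublist.append(-1)
--         containment_list.append(contanment_sublist)
--
--     return containment_list
-- ===== SOURCE B (Python) =====
-- def generate_containment_list(t, positions_of_char_from_a_in_t):
--     words = t.split()
--     n = len(t)
--     # one scan of t: sb[k] = number of spaces in t[:k]; ls[k] = index of last space in t[:k], -1 if none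
--     sb = [0]
--     ls = [-1]
--     for k in range(n):
--         if t[k] == " ":
--             sb.append(sb[-1] + 1)
--             ls.append(k)
--         else:
--             sb.append(sb[-1])
--             ls.append(ls[-1])
--     m = sb[n - 1] + 1 if n > 0 else 0
--     result = [[] for _ in range(m)]
--     # one pass over the positions, bucketing each into its word's sublist
--     for j, pos in enumerate(positions_of_char_from_a_in_t):
--         if not (0 <= pos < n) or t[pos] == " ":
--             continue
--         wi = sb[pos]
--         if j == 0 and words[wi][0].lower() == t[pos].lower():
--             v = 0
--         elif words[wi][:2] == "x_" and t[pos] == "e":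
--             v = 0
--         else:
--             v = pos - 1 - ls[pos]
--         result[wi].append(v)
--     return [sub if sub else [-1] for sub in result]
-- ===== Notes on version B (the rewrite author's own statement) =====
-- stated objective: faster
-- what changed: A rescans t to build explicit per-word position intervals and then, for every word, rescans the whole positions list with 'pos in interval' and 'interval.index(pos)' linear searches; B builds two prefix tables (spaces-before and last-space-before each position) in one scan of t and then bucket-fills the result in a single pass over the positions with O(1) table lookups.
import Mathlib
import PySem

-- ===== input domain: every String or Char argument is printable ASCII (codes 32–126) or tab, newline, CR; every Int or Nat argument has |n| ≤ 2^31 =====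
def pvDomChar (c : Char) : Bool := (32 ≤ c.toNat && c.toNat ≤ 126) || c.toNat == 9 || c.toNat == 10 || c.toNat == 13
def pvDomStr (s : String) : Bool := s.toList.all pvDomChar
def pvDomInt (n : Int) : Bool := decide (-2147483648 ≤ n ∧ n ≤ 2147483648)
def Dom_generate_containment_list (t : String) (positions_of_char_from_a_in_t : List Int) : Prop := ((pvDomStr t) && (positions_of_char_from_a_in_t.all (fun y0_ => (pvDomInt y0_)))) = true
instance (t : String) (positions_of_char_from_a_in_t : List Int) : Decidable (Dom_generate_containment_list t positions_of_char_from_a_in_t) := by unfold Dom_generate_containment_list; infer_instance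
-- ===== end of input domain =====

-- B replaces A's per-word rescans of t and of the positions list by two prefix tables
-- (spaces-before, last-space-before) built in one scan of t plus one bucketing pass over
-- the positions (objective: faster). Equality of RETURN values is proved on Pre_ (A raises
-- IndexError outside it).

-- ===== PORT A =====
-- inner while loop of the interval builder: collect j while j < len(t) and t[j] != " "
def pvScanWordA (cs : List Char) (j : Nat) : List Int :=
  if h : j < cs.length then
    if cs[j] ≠ ' ' then (j : Int) :: pvScanWordA cs (j + 1) else []
  else []
termination_by cs.length - j

-- outer while loop: i jumps to one past the end of the word scanned from i
def pvIntervalsA (cs : List Char) (i : Nat) : List (List Int) :=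
  if h : i < cs.length then
    let sub := pvScanWordA cs i
    sub :: pvIntervalsA cs (i + sub.length + 1)
  else []
termination_by cs.length - i
decreasing_by omega

-- the inner 'for j, pos in enumerate(positions)' loop building contanment_sublist for word i
-- (splitted_term[i] / t[pos] via pyGet?; the defaults are only read where Python would raise,
-- i.e. outside Pre_, or under a conjunct already false)
def pvSubA (cs : List Char) (words : List (List Char)) (i : Int) (interval : List Int)
    (positions : List Int) : List Int :=
  (PySem.List.enumerate positions 0).foldl (fun acc jp =>
    let word := (PySem.List.pyGet? words i).getD []
    let c := (PySem.List.pyGet? cs jp.2).getD ' '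
    if jp.2 ∈ interval ∧ PySem.Chars.lowerChar ((PySem.List.pyGet? word 0).getD ' ') = PySem.Chars.lowerChar c ∧ jp.1 = 0 then
      acc ++ [0]
    else if jp.2 ∈ interval ∧ (word.take 2 = ['x', '_'] ∧ c = 'e') then  -- word[:2] == "x_"
      acc ++ [0]
    else if jp.2 ∈ interval then
      acc ++ [((PySem.List.index? interval jp.2).getD 0 : Int)]
    else acc) []

def generate_containment_list (t : String) (positions_of_char_from_a_in_t : List Int) : List (List Int) :=
  let cs := t.toList
  let splitted_term := PySem.Chars.split₀ cs
  let term_intervals := pvIntervalsA cs 0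
  (PySem.List.enumerate term_intervals 0).foldl (fun acc ip =>
    let sub := pvSubA cs splitted_term ip.1 ip.2 positions_of_char_from_a_in_t
    acc ++ [if sub = [] then [-1] else sub]) []

-- ===== PORT B =====
-- one scan of t: sb[k] = #spaces in t[:k], ls[k] = last index of " " in t[:k] (-1 if none);
-- sb[-1] / ls[-1] are Python negative indexing via pyGet?
def pvStepB (p : List Int × List Int) (kc : Int × Char) : List Int × List Int :=
  if kc.2 = ' ' then
    (p.1 ++ [(PySem.List.pyGet? p.1 (-1)).getD 0 + 1], p.2 ++ [kc.1])
  else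
    (p.1 ++ [(PySem.List.pyGet? p.1 (-1)).getD 0], p.2 ++ [(PySem.List.pyGet? p.2 (-1)).getD 0])

def pvTablesB (cs : List Char) : List Int × List Int :=
  (PySem.List.enumerate cs 0).foldl pvStepB ([0], [-1])

-- the bucketing pass: result[wi].append(v) is List.modify (wi is a prefix count, hence ≥ 0,
-- so .toNat is exact for Python's list indexing here)
def pvBucketB (cs : List Char) (words : List (List Char)) (n : Nat) (sb ls : List Int)
    (positions : List Int) (res0 : List (List Int)) : List (List Int) :=
  (PySem.List.enumerate positions 0).foldl (fun res jp =>
    if ¬(0 ≤ jp.2 ∧ jp.2 < (n : Int)) then res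
    else
      let c := (PySem.List.pyGet? cs jp.2).getD ' '
      if c = ' ' then res
      else
        let wi := (PySem.List.pyGet? sb jp.2).getD 0
        let word := (PySem.List.pyGet? words wi).getD []
        let v : Int :=
          if jp.1 = 0 ∧ PySem.Chars.lowerChar ((PySem.List.pyGet? word 0).getD ' ') = PySem.Chars.lowerChar c then 0
          else if word.take 2 = ['x', '_'] ∧ c = 'e' then 0
          else jp.2 - 1 - (PySem.List.pyGet? ls jp.2).getD 0
        res.modify wi.toNat (· ++ [v])) res0

def generate_containment_list_alt (t : String) (positions_of_char_from_a_in_t : List Int) : List (List Int) :=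
  let cs := t.toList
  let words := PySem.Chars.split₀ cs
  let n := cs.length
  let tb := pvTablesB cs
  let m : Int := if 0 < n then (PySem.List.pyGet? tb.1 ((n : Int) - 1)).getD 0 + 1 else 0
  let res := pvBucketB cs words n tb.1 tb.2 positions_of_char_from_a_in_t
    (List.replicate m.toNat ([] : List Int))
  res.map (fun sub => if sub = [] then [-1] else sub)

-- ===== PRECONDITION & SPEC =====
-- Pre_ excludes exactly the inputs on which Python A raises IndexError: some position lies in
-- a space-delimited segment of t whose index is ≥ the number of whitespace-split words
-- (possible only via leading/doubled spaces or non-space whitespace in t).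
def Pre_generate_containment_list (t : String) (positions_of_char_from_a_in_t : List Int) : Prop :=
  ∀ p ∈ positions_of_char_from_a_in_t, 0 ≤ p → p.toNat < t.toList.length →
    t.toList[p.toNat]? ≠ some ' ' →
    ((t.toList.take p.toNat).count ' ') < (PySem.Chars.split₀ t.toList).length
instance (t : String) (positions_of_char_from_a_in_t : List Int) : Decidable (Pre_generate_containment_list t positions_of_char_from_a_in_t) := by unfold Pre_generate_containment_list; infer_instance

def pvWitness_generate_containment_list : String × List Int := ("ab x_e", [0, 4, 5])

def Spec_generate_containment_list (t : String) (positions_of_char_from_a_in_t : List Int) (out : List (List Int)) : Prop := out = generate_containment_list_alt t positions_of_char_from_a_in_t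
instance (t : String) (positions_of_char_from_a_in_t : List Int) (out : List (List Int)) : Decidable (Spec_generate_containment_list t positions_of_char_from_a_in_t out) := by unfold Spec_generate_containment_list; infer_instance

-- ===== CLAIM (what is proved, stated in full; the proofs are below) =====
def Claim_equal_generate_containment_list : Prop := ∀ (t : String) (positions_of_char_from_a_in_t : List Int), Dom_generate_containment_list t positions_of_char_from_a_in_t → Pre_generate_containment_list t positions_of_char_from_a_in_t → Spec_generate_containment_list t positions_of_char_from_a_in_t (generate_containment_list t positions_of_char_from_a_in_t)


-- ===== LEMMAS AND PROOFS =====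

-- spec functions for B's two tables: sbv cs p = #spaces in cs[:p], lsv cs p = last space index in cs[:p] (-1 if none)
def sbv (cs : List Char) : Nat → Int
  | 0 => 0
  | p + 1 => sbv cs p + (if cs[p]? = some ' ' then 1 else 0)

def lsv (cs : List Char) : Nat → Int
  | 0 => -1
  | p + 1 => if cs[p]? = some ' ' then (p : Int) else lsv cs p

theorem sbv_mono (cs : List Char) {p q : Nat} (h : p ≤ q) : sbv cs p ≤ sbv cs q := by
  induction q with
  | zero => simp_all
  | succ q ih =>
    rcases Nat.lt_or_ge p (q+1) with h' | h'
    · have := ih (by omega); simp only [sbv]; split <;> omega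
    · have : p = q + 1 := by omega
      simp [this]

theorem sbv_lt_of_space (cs : List Char) {p q : Nat} (h : p < q) (hs : cs[p]? = some ' ') :
    sbv cs p < sbv cs q := by
  have h1 : sbv cs (p+1) = sbv cs p + 1 := by simp [sbv, hs]
  have := sbv_mono cs (q := q) (p := p+1) (by omega)
  omega

theorem sbv_const_of_nospace (cs : List Char) {s p : Nat}
    (hns : ∀ q, s ≤ q → q < p → cs[q]? ≠ some ' ') (hsp : s ≤ p) : sbv cs p = sbv cs s := by
  induction p with
  | zero =>
    have : s = 0 := by omega
    simp [this]
  | succ p ih =>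
    rcases Nat.lt_or_ge s (p+1) with h' | h'
    · have hp : s ≤ p := by omega
      have := ih (fun q hq hq' => hns q hq (by omega)) hp
      simp only [sbv, hns p hp (by omega)]
      simpa using this
    · have : s = p + 1 := by omega
      simp [this]

theorem lsv_const_of_nospace (cs : List Char) {s p : Nat}
    (hns : ∀ q, s ≤ q → q < p → cs[q]? ≠ some ' ')
    (hinv : s = 0 ∨ cs[s-1]? = some ' ') (hsp : s ≤ p) : lsv cs p = (s : Int) - 1 := by
  induction p with
  | zero =>
    have : s = 0 := by omega
    simp [this, lsv]
  | succ p ih =>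
    rcases Nat.lt_or_ge s (p+1) with h' | h'
    · have hp : s ≤ p := by omega
      have := ih (fun q hq hq' => hns q hq (by omega)) hp
      simpa only [lsv, if_neg (hns p hp (by omega))] using this
    · have hs : s = p + 1 := by omega
      rcases hinv with h0 | hsp'
      · omega
      · subst hs
        simp only [lsv]
        simp only [Nat.add_sub_cancel] at hsp'
        simp [hsp']

-- B tables: sbv/lsv append lemmas, then the content of pvTablesB
theorem sbv_append (l : List Char) (c : Char) {p : Nat} (h : p ≤ l.length) :
    sbv (l ++ [c]) p = sbv l p := by
  induction p with
  | zero => rfl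
  | succ p ih =>
    have hp : p < l.length := by omega
    simp only [sbv, ih (by omega), List.getElem?_append_left hp]

theorem lsv_append (l : List Char) (c : Char) {p : Nat} (h : p ≤ l.length) :
    lsv (l ++ [c]) p = lsv l p := by
  induction p with
  | zero => rfl
  | succ p ih =>
    have hp : p < l.length := by omega
    simp only [lsv, ih (by omega), List.getElem?_append_left hp]

theorem tablesB_eq (cs : List Char) :
    pvTablesB cs = ((List.range (cs.length + 1)).map (fun p => sbv cs p),
                    (List.range (cs.length + 1)).map (fun p => lsv cs p)) := by
  induction cs using List.reverseRecOn with
  | nil => decide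
  | append_singleton l c ih =>
    have step : pvTablesB (l ++ [c]) = pvStepB (pvTablesB l) (((0 : Int) + l.length, c)) := by
      simp [pvTablesB, PySem.List.enumerate_append]
    rw [step, ih]
    have hlast1 : PySem.List.pyGet? ((List.range (l.length + 1)).map (fun p => sbv l p)) (-1)
        = some (sbv l l.length) := by
      rw [PySem.List.pyGet?_neg_one]
      simp [List.range_succ, List.getLast?_append]
    have hlast2 : PySem.List.pyGet? ((List.range (l.length + 1)).map (fun p => lsv l p)) (-1)
        = some (lsv l l.length) := by
      rw [PySem.List.pyGet?_neg_one]
      simp [List.range_succ, List.getLast?_append]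
    have hr : List.range (l.length + 1 + 1) = List.range (l.length + 1) ++ [l.length + 1] := by
      simp [List.range_succ]
    have hm1 : ∀ p ∈ List.range (l.length + 1), sbv (l ++ [c]) p = sbv l p := by
      intro p hp; exact sbv_append l c (by simpa using List.mem_range.mp hp)
    have hm2 : ∀ p ∈ List.range (l.length + 1), lsv (l ++ [c]) p = lsv l p := by
      intro p hp; exact lsv_append l c (by simpa using List.mem_range.mp hp)
    have hsb : sbv (l ++ [c]) (l.length + 1) = sbv l l.length + (if c = ' ' then 1 else 0) := by
      simp [sbv, sbv_append l c (le_refl _), List.getElem?_append_right]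
    have hls : lsv (l ++ [c]) (l.length + 1) = if c = ' ' then (l.length : Int) else lsv l l.length := by
      simp [lsv, lsv_append l c (le_refl _), List.getElem?_append_right]
    have e1 : List.map (fun p => sbv (l ++ [c]) p) (List.range (l.length + 1 + 1))
        = List.map (fun p => sbv l p) (List.range (l.length + 1)) ++ [sbv (l ++ [c]) (l.length + 1)] := by
      rw [hr, List.map_append,
        List.map_congr_left hm1]
      simp
    have e2 : List.map (fun p => lsv (l ++ [c]) p) (List.range (l.length + 1 + 1))
        = List.map (fun p => lsv l p) (List.range (l.length + 1)) ++ [lsv (l ++ [c]) (l.length + 1)] := by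
      rw [hr, List.map_append,
        List.map_congr_left hm2]
      simp
    rw [show ((l ++ [c]).length + 1) = l.length + 1 + 1 by simp, e1, e2, hsb, hls]
    by_cases hc : c = ' ' <;> simp [pvStepB, hc, hlast1, hlast2]

-- scanWord facts
-- folded unfolding equations for pvScanWordA / pvIntervalsA
theorem pvScanWordA_cons {cs : List Char} {j : Nat} (h : j < cs.length) (hc : cs[j] ≠ ' ') :
    pvScanWordA cs j = (j : Int) :: pvScanWordA cs (j + 1) := by
  conv_lhs => rw [pvScanWordA]
  simp [h, hc]

theorem pvScanWordA_nil_space {cs : List Char} {j : Nat} (h : j < cs.length) (hc : ¬ cs[j] ≠ ' ') :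
    pvScanWordA cs j = [] := by
  conv_lhs => rw [pvScanWordA]
  simp [h, hc]

theorem pvScanWordA_nil_ge {cs : List Char} {j : Nat} (h : ¬ j < cs.length) :
    pvScanWordA cs j = [] := by
  conv_lhs => rw [pvScanWordA]
  simp [h]

theorem pvIntervalsA_cons {cs : List Char} {i : Nat} (h : i < cs.length) :
    pvIntervalsA cs i = pvScanWordA cs i :: pvIntervalsA cs (i + (pvScanWordA cs i).length + 1) := by
  conv_lhs => rw [pvIntervalsA]
  simp [h]

theorem pvIntervalsA_nil {cs : List Char} {i : Nat} (h : ¬ i < cs.length) :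
    pvIntervalsA cs i = [] := by
  conv_lhs => rw [pvIntervalsA]
  simp [h]

theorem scanWordA_nospace (cs : List Char) (s : Nat) :
    ∀ q, s ≤ q → q < s + (pvScanWordA cs s).length → cs[q]? ≠ some ' ' := by
  induction s using pvScanWordA.induct (cs := cs) with
  | case1 j h hc ih =>
    intro q hq1 hq2
    rw [pvScanWordA_cons h hc, List.length_cons] at hq2
    rcases Nat.eq_or_lt_of_le hq1 with he | hlt
    · subst he
      simp [List.getElem?_eq_getElem h, hc]
    · exact ih q hlt (by omega)
  | case2 j h hc =>
    intro q hq1 hq2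
    rw [pvScanWordA_nil_space h hc] at hq2
    simp at hq2; omega
  | case3 j h =>
    intro q hq1 hq2
    rw [pvScanWordA_nil_ge h] at hq2
    simp at hq2; omega

theorem scanWordA_le (cs : List Char) (s : Nat) (hs : s ≤ cs.length) :
    s + (pvScanWordA cs s).length ≤ cs.length := by
  induction s using pvScanWordA.induct (cs := cs) with
  | case1 j h hc ih =>
    rw [pvScanWordA_cons h hc, List.length_cons]
    have := ih (by omega)
    omega
  | case2 j h hc => rw [pvScanWordA_nil_space h hc]; simpa using hs
  | case3 j h => rw [pvScanWordA_nil_ge h]; simpa using hs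

theorem scanWordA_end (cs : List Char) (s : Nat) (hs : s ≤ cs.length) :
    s + (pvScanWordA cs s).length = cs.length ∨
      cs[s + (pvScanWordA cs s).length]? = some ' ' := by
  induction s using pvScanWordA.induct (cs := cs) with
  | case1 j h hc ih =>
    rw [pvScanWordA_cons h hc, List.length_cons]
    rcases ih (by omega) with h' | h'
    · left; omega
    · right
      rw [show j + ((pvScanWordA cs (j+1)).length + 1) = (j+1) + (pvScanWordA cs (j+1)).length by omega]
      exact h'
  | case2 j h hc =>
    rw [pvScanWordA_nil_space h hc]
    right
    simp only [ne_eq, not_not] at hc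
    simp [List.getElem?_eq_getElem h, hc]
  | case3 j h =>
    left
    rw [pvScanWordA_nil_ge h]
    simp; omega

theorem scanWordA_mem (cs : List Char) (s : Nat) (pos : Int) :
    pos ∈ pvScanWordA cs s ↔ ∃ p : Nat, pos = (p : Int) ∧ s ≤ p ∧ p < s + (pvScanWordA cs s).length := by
  induction s using pvScanWordA.induct (cs := cs) with
  | case1 j h hc ih =>
    rw [pvScanWordA_cons h hc]
    simp only [List.mem_cons, List.length_cons, ih]
    constructor
    · rintro (rfl | ⟨p, rfl, h1, h2⟩)
      · exact ⟨j, rfl, by omega, by omega⟩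
      · exact ⟨p, rfl, by omega, by omega⟩
    · rintro ⟨p, rfl, h1, h2⟩
      rcases Nat.eq_or_lt_of_le h1 with he | hlt
      · left; simp [he]
      · right; exact ⟨p, rfl, hlt, by omega⟩
  | case2 j h hc =>
    rw [pvScanWordA_nil_space h hc]
    simp only [List.not_mem_nil, false_iff, List.length_nil]
    rintro ⟨p, rfl, h1, h2⟩; omega
  | case3 j h =>
    rw [pvScanWordA_nil_ge h]
    simp only [List.not_mem_nil, false_iff, List.length_nil]
    rintro ⟨p, rfl, h1, h2⟩; omega

theorem scanWordA_index (cs : List Char) (s : Nat) : ∀ p : Nat, (p : Int) ∈ pvScanWordA cs s →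
    PySem.List.index? (pvScanWordA cs s) (p : Int) = some (p - s) := by
  induction s using pvScanWordA.induct (cs := cs) with
  | case1 j h hc ih =>
    intro p hp
    rw [pvScanWordA_cons h hc] at hp ⊢
    by_cases he : (j : Int) = (p : Int)
    · rw [he, PySem.List.index?_cons_self]
      have hpj : p = j := by exact_mod_cast he.symm
      simp [hpj]
    · rw [PySem.List.index?_cons_of_ne _ he]
      rcases List.mem_cons.mp hp with h' | h'
      · exact absurd h'.symm he
      · have hge : j + 1 ≤ p := by
          rcases (scanWordA_mem cs (j+1) (p : Int)).mp h' with ⟨p', hpe, h1, h2⟩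
          have : p = p' := by exact_mod_cast hpe
          omega
        rw [ih p h']
        simp only [Option.map_some]
        congr 1; omega
  | case2 j h hc =>
    intro p hp
    rw [pvScanWordA_nil_space h hc] at hp
    simp at hp
  | case3 j h =>
    intro p hp
    rw [pvScanWordA_nil_ge h] at hp
    simp at hp

-- the main characterisation of A's term_intervals, in terms of B's table specs
theorem intervalsA_char (cs : List Char) : ∀ fuel s, cs.length - s ≤ fuel → s ≤ cs.length →
    (s = 0 ∨ cs[s-1]? = some ' ') →
    (((pvIntervalsA cs s).length : Int) =
        (if s < cs.length then sbv cs (cs.length - 1) - sbv cs s + 1 else 0)) ∧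
    (∀ (i : Nat) (iv : List Int), (pvIntervalsA cs s)[i]? = some iv →
      (∀ pos : Int, (pos ∈ iv ↔ ∃ p : Nat, pos = (p : Int) ∧ s ≤ p ∧ p < cs.length ∧
          cs[p]? ≠ some ' ' ∧ sbv cs p - sbv cs s = (i : Int))) ∧
      (∀ p : Nat, (p : Int) ∈ iv →
        (((PySem.List.index? iv (p : Int)).getD 0 : Nat) : Int) = (p : Int) - 1 - lsv cs p)) := by
  intro fuel
  induction fuel with
  | zero =>
    intro s hf hs hinv
    by_cases hlt : s < cs.length
    · omega
    · rw [pvIntervalsA_nil hlt]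
      refine ⟨by simp [hlt], ?_⟩
      intro i iv hiv
      simp at hiv
  | succ fuel ih =>
    intro s hf hs hinv
    by_cases hlt : s < cs.length
    · set n := cs.length with hn
      set L := (pvScanWordA cs s).length with hL
      have hle : s + L ≤ n := scanWordA_le cs s hs
      have hns : ∀ q, s ≤ q → q < s + L → cs[q]? ≠ some ' ' := scanWordA_nospace cs s
      have hsbv_const : ∀ p, s ≤ p → p ≤ s + L → sbv cs p = sbv cs s := by
        intro p h1 h2
        exact sbv_const_of_nospace cs (fun q hq hq' => hns q hq (by omega)) h1
      have hmem0 : ∀ pos : Int, (pos ∈ pvScanWordA cs s ↔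
          ∃ p : Nat, pos = (p : Int) ∧ s ≤ p ∧ p < s + L) := fun pos => scanWordA_mem cs s pos
      have hidx0 : ∀ p : Nat, (p : Int) ∈ pvScanWordA cs s →
          (((PySem.List.index? (pvScanWordA cs s) (p : Int)).getD 0 : Nat) : Int)
            = (p : Int) - 1 - lsv cs p := by
        intro p hp
        obtain ⟨p', hpe, h1, h2⟩ := (hmem0 (p : Int)).mp hp
        have hpp : p = p' := by exact_mod_cast hpe
        subst hpp
        rw [scanWordA_index cs s p hp]
        have hlsv : lsv cs p = (s : Int) - 1 :=
          lsv_const_of_nospace cs (fun q hq hq' => hns q hq (by omega)) hinv h1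
        rw [hlsv]
        simp only [Option.getD_some]
        omega
      rw [pvIntervalsA_cons hlt]
      rcases scanWordA_end cs s hs with hend | hend'
      · -- the word runs to the end of t: the tail call is past the end, one interval
        have htail : pvIntervalsA cs (s + L + 1) = [] := pvIntervalsA_nil (by omega)
        rw [htail]
        constructor
        · have : sbv cs (n - 1) = sbv cs s := hsbv_const (n - 1) (by omega) (by omega)
          simp [hlt, this]
        · intro i iv hiv
          match i, hiv with
          | 0, hiv =>
            have hiv' : pvScanWordA cs s = iv := by simpa using hiv
            subst hiv'
            refine ⟨?_, hidx0⟩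
            intro pos
            rw [hmem0 pos]
            constructor
            · rintro ⟨p, rfl, h1, h2⟩
              exact ⟨p, rfl, h1, by omega, hns p h1 h2, by rw [hsbv_const p h1 (by omega)]; simp⟩
            · rintro ⟨p, rfl, h1, h2, h3, h4⟩
              exact ⟨p, rfl, h1, by omega⟩
      · -- the word is followed by a space at s+L: recurse from s+L+1
        have hend : cs[s + L]? = some ' ' := hend'
        have hsL : s + L < n := by
          by_contra hc
          have : cs[s + L]? = none := by
            rw [List.getElem?_eq_none_iff]; omega
          simp [this] at hend
        have hsbs' : sbv cs (s + L + 1) = sbv cs s + 1 := by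
          have h1 : sbv cs (s + L + 1) = sbv cs (s + L) + 1 := by simp [sbv, hend]
          rw [h1, hsbv_const (s + L) (by omega) (by omega)]
        obtain ⟨ihlen, ihget⟩ := ih (s + L + 1) (by omega) (by omega) (Or.inr (by simpa using hend))
        constructor
        · by_cases hlt' : s + L + 1 < n
          · rw [if_pos hlt'] at ihlen
            simp only [List.length_cons, if_pos hlt, ← hL]
            push_cast
            omega
          · have : pvIntervalsA cs (s + L + 1) = [] := pvIntervalsA_nil hlt'
            rw [this]
            have hn1 : n - 1 = s + L := by omega
            have : sbv cs (n - 1) = sbv cs s := by rw [hn1]; exact hsbv_const (s + L) (by omega) (by omega)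
            simp [hlt, this]
        · intro i iv hiv
          match i, hiv with
          | 0, hiv =>
            have hiv' : pvScanWordA cs s = iv := by simpa using hiv
            subst hiv'
            refine ⟨?_, hidx0⟩
            intro pos
            rw [hmem0 pos]
            constructor
            · rintro ⟨p, rfl, h1, h2⟩
              exact ⟨p, rfl, h1, by omega, hns p h1 h2, by rw [hsbv_const p h1 (by omega)]; simp⟩
            · rintro ⟨p, rfl, h1, h2, h3, h4⟩
              refine ⟨p, rfl, h1, ?_⟩
              by_contra hge
              have hpge : s + L ≤ p := by omega
              rcases Nat.eq_or_lt_of_le hpge with he | hlt2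
              · exact h3 (by rw [← he]; exact hend)
              · have := sbv_lt_of_space cs hlt2 hend
                have h5 := hsbv_const (s + L) (by omega) (by omega)
                omega
          | (i + 1), hiv =>
            have hiv' : (pvIntervalsA cs (s + L + 1))[i]? = some iv := by simpa using hiv
            obtain ⟨ihm, ihi⟩ := ihget i iv hiv'
            refine ⟨?_, ihi⟩
            intro pos
            rw [ihm pos]
            constructor
            · rintro ⟨p, rfl, h1, h2, h3, h4⟩
              refine ⟨p, rfl, by omega, h2, h3, ?_⟩
              rw [hsbs'] at h4
              push_cast
              omega
            · rintro ⟨p, rfl, h1, h2, h3, h4⟩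
              have hps' : s + L + 1 ≤ p := by
                by_contra hc
                have hple : p ≤ s + L := by omega
                rcases Nat.eq_or_lt_of_le hple with he | hlt2
                · exact h3 (by rw [he]; exact hend)
                · have := hsbv_const p h1 (by omega)
                  push_cast at h4
                  omega
              refine ⟨p, rfl, hps', h2, h3, ?_⟩
              rw [hsbs'] at *
              push_cast at h4 ⊢
              omega
    · rw [pvIntervalsA_nil hlt]
      refine ⟨by simp [hlt], ?_⟩
      intro i iv hiv
      simp at hiv

-- generic loop shapes
theorem pvFoldlAppendOpt {γ : Type} (l : List γ) (f : γ → Option Int) (acc : List Int) :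
    l.foldl (fun a x => match f x with | some v => a ++ [v] | none => a) acc
      = acc ++ l.filterMap f := by
  induction l generalizing acc with
  | nil => simp
  | cons x l ih =>
    simp only [List.foldl_cons, List.filterMap_cons]
    cases f x <;> simp [ih]

theorem pvFoldlBucket (items : List (Int × Int)) (F : Int × Int → Option (Nat × Int)) :
    ∀ (res : List (List Int)),
      (items.foldl (fun r x => match F x with | none => r | some wv => r.modify wv.1 (· ++ [wv.2])) res).length = res.length ∧
      ∀ i : Nat,
        (items.foldl (fun r x => match F x with | none => r | some wv => r.modify wv.1 (· ++ [wv.2])) res)[i]?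
          = res[i]?.map (· ++ items.filterMap (fun x => match F x with
              | none => none
              | some wv => if wv.1 = i then some wv.2 else none)) := by
  induction items with
  | nil => intro res; simp
  | cons x items ih =>
    intro res
    simp only [List.foldl_cons, List.filterMap_cons]
    cases hF : F x with
    | none => simpa using ih res
    | some wv =>
      obtain ⟨ihl, ihg⟩ := ih (res.modify wv.1 (· ++ [wv.2]))
      refine ⟨by simpa using ihl, ?_⟩
      intro i
      rw [ihg i, List.getElem?_modify]
      by_cases hwi : wv.1 = i
      · subst hwi; cases res[wv.1]? <;> simp
      · cases res[i]? <;> simp [hwi]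

-- the two inner loops as filterMaps
def pvGA (cs : List Char) (words : List (List Char)) (i : Int) (interval : List Int) :
    Int × Int → Option Int := fun jp =>
  let word := (PySem.List.pyGet? words i).getD []
  let c := (PySem.List.pyGet? cs jp.2).getD ' '
  if jp.2 ∈ interval ∧ PySem.Chars.lowerChar ((PySem.List.pyGet? word 0).getD ' ') = PySem.Chars.lowerChar c ∧ jp.1 = 0 then some 0
  else if jp.2 ∈ interval ∧ (word.take 2 = ['x', '_'] ∧ c = 'e') then some 0
  else if jp.2 ∈ interval then some (((PySem.List.index? interval jp.2).getD 0 : Nat) : Int)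
  else none

theorem subA_eq_filterMap (cs : List Char) (words : List (List Char)) (i : Int)
    (interval : List Int) (ps : List Int) :
    pvSubA cs words i interval ps
      = (PySem.List.enumerate ps 0).filterMap (pvGA cs words i interval) := by
  unfold pvSubA
  rw [PySem.List.foldl_congr_mem _ _
    (fun a jp => match pvGA cs words i interval jp with | some v => a ++ [v] | none => a) _
    (by
      intro a jp _
      simp only [pvGA]
      split_ifs <;> rfl)]
  simpa using pvFoldlAppendOpt (PySem.List.enumerate ps 0) (pvGA cs words i interval) []

def pvFB (cs : List Char) (words : List (List Char)) (n : Nat) (sb ls : List Int) :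
    Int × Int → Option (Nat × Int) := fun jp =>
  if ¬(0 ≤ jp.2 ∧ jp.2 < (n : Int)) then none
  else
    let c := (PySem.List.pyGet? cs jp.2).getD ' '
    if c = ' ' then none
    else
      let wi := (PySem.List.pyGet? sb jp.2).getD 0
      let word := (PySem.List.pyGet? words wi).getD []
      let v : Int :=
        if jp.1 = 0 ∧ PySem.Chars.lowerChar ((PySem.List.pyGet? word 0).getD ' ') = PySem.Chars.lowerChar c then 0
        else if word.take 2 = ['x', '_'] ∧ c = 'e' then 0
        else jp.2 - 1 - (PySem.List.pyGet? ls jp.2).getD 0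
      some (wi.toNat, v)

theorem bucketB_char (cs : List Char) (words : List (List Char)) (n : Nat) (sb ls : List Int)
    (ps : List Int) (res0 : List (List Int)) :
    (pvBucketB cs words n sb ls ps res0).length = res0.length ∧
    ∀ i : Nat, (pvBucketB cs words n sb ls ps res0)[i]?
      = res0[i]?.map (· ++ (PySem.List.enumerate ps 0).filterMap (fun x =>
          match pvFB cs words n sb ls x with
          | none => none
          | some wv => if wv.1 = i then some wv.2 else none)) := by
  unfold pvBucketB
  rw [PySem.List.foldl_congr_mem _ _
    (fun r x => match pvFB cs words n sb ls x with | none => r | some wv => r.modify wv.1 (· ++ [wv.2])) _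
    (by
      intro r jp _
      simp only [pvFB]
      split_ifs <;> rfl)]
  exact pvFoldlBucket (PySem.List.enumerate ps 0) (pvFB cs words n sb ls) res0

-- the two ports agree on every input (the Pre_ hypothesis is not needed for the ports,
-- whose pyGet? defaults stand in for Python's IndexError)
theorem portA_eq_portB (t : String) (ps : List Int) :
    generate_containment_list t ps = generate_containment_list_alt t ps := by
  set cs := t.toList with hcs
  set words := PySem.Chars.split₀ cs with hwords
  set n := cs.length with hn
  -- characterisation of A's intervals
  obtain ⟨hlen, hget⟩ := intervalsA_char cs n 0 (by omega) (by omega) (Or.inl rfl)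
  rw [← hn] at hlen hget
  have hsbv0 : sbv cs 0 = 0 := rfl
  have hsbvnn : ∀ p : Nat, 0 ≤ sbv cs p := by
    intro p
    have := sbv_mono cs (p := 0) (q := p) (by omega)
    omega
  -- B's tables
  have htb := tablesB_eq cs
  -- shape of A
  have hA : generate_containment_list t ps
      = (PySem.List.enumerate (pvIntervalsA cs 0) 0).map (fun ip =>
          let sub := pvSubA cs words ip.1 ip.2 ps
          if sub = [] then [-1] else sub) := by
    unfold generate_containment_list
    rw [PySem.List.foldl_congr_mem _ _
      (fun acc ip => acc ++ [(fun ip =>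
          let sub := pvSubA cs words ip.1 ip.2 ps
          if sub = [] then [-1] else sub) ip]) _ (by intro acc ip _; rfl)]
    simpa using PySem.List.foldl_append_singleton_eq_map
      (l := PySem.List.enumerate (pvIntervalsA cs 0) 0) (acc := []) (f := fun ip =>
          let sub := pvSubA cs words ip.1 ip.2 ps
          if sub = [] then [-1] else sub)
  -- the value of B's m
  have hm : (if 0 < n then (PySem.List.pyGet? (pvTablesB cs).1 ((n : Int) - 1)).getD 0 + 1 else 0)
      = (if 0 < n then sbv cs (n - 1) + 1 else 0) := by
    by_cases h0 : 0 < n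
    · rw [if_pos h0, if_pos h0, htb]
      have : ((n : Int) - 1) = ((n - 1 : Nat) : Int) := by omega
      rw [this, PySem.List.pyGet?_natCast]
      rw [List.getElem?_map, List.getElem?_range (by omega)]
      rfl
    · simp [h0]
  -- lengths agree
  have hAlen : ((pvIntervalsA cs 0).length : Int)
      = (if 0 < n then sbv cs (n - 1) + 1 else 0) := by
    rw [hlen]
    by_cases h0 : 0 < n <;> simp [h0, hsbv0]
  -- unfold B
  have hB : generate_containment_list_alt t ps
      = (pvBucketB cs words n (pvTablesB cs).1 (pvTablesB cs).2 ps
          (List.replicate (if 0 < n then sbv cs (n - 1) + 1 else 0).toNat ([] : List Int))).map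
          (fun sub => if sub = [] then [-1] else sub) := by
    rw [show generate_containment_list_alt t ps
        = (pvBucketB cs words n (pvTablesB cs).1 (pvTablesB cs).2 ps
            (List.replicate ((if 0 < n then (PySem.List.pyGet? (pvTablesB cs).1 ((n : Int) - 1)).getD 0 + 1 else 0)).toNat ([] : List Int))).map
            (fun sub => if sub = [] then [-1] else sub) from rfl, hm]
  obtain ⟨hblen, hbget⟩ := bucketB_char cs words n (pvTablesB cs).1 (pvTablesB cs).2 ps
      (List.replicate (if 0 < n then sbv cs (n - 1) + 1 else 0).toNat ([] : List Int))
  -- pointwise equality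
  rw [hA, hB]
  apply List.ext_getElem?
  intro i
  rw [List.getElem?_map, List.getElem?_map, hbget i, PySem.List.getElem?_enumerate]
  by_cases hi : i < (pvIntervalsA cs 0).length
  · -- a real bucket on both sides
    obtain ⟨iv, hiv⟩ : ∃ iv, (pvIntervalsA cs 0)[i]? = some iv :=
      ⟨_, List.getElem?_eq_getElem hi⟩
    have hrep : (List.replicate (if 0 < n then sbv cs (n - 1) + 1 else 0).toNat ([] : List Int))[i]?
        = some [] := by
      rw [List.getElem?_replicate]
      rw [if_pos]
      omega
    rw [hiv, hrep]
    obtain ⟨hmem, hidx⟩ := hget i iv hiv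
    simp only [Option.map_some, Option.some.injEq]
    have hfm : pvSubA cs words (0 + (i : Int)) iv ps
        = (PySem.List.enumerate ps 0).filterMap (fun x =>
            match pvFB cs words n (pvTablesB cs).1 (pvTablesB cs).2 x with
            | none => none
            | some wv => if wv.1 = i then some wv.2 else none) := by
      rw [subA_eq_filterMap]
      apply List.filterMap_congr
      intro jp _
      rcases jp with ⟨j, pos⟩
      by_cases hpos : pos ∈ iv
      · obtain ⟨p, rfl, _, hp2, hp3, hp4⟩ := (hmem pos).mp hpos
        rw [hsbv0] at hp4
        have hp4' : sbv cs p = (i : Int) := by omega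
        have hcp : cs[p]? = some (cs[p]'(by omega)) := List.getElem?_eq_getElem (by omega)
        have hcget : PySem.List.pyGet? cs (p : Int) = some (cs[p]'(by omega)) := by
          rw [PySem.List.pyGet?_natCast, hcp]
        have hcne : cs[p]'(by omega) ≠ ' ' := by
          intro h
          exact hp3 (by rw [hcp, h])
        have hsbget : PySem.List.pyGet? (pvTablesB cs).1 (p : Int) = some (sbv cs p) := by
          rw [htb, PySem.List.pyGet?_natCast, List.getElem?_map, List.getElem?_range (by omega)]
          rfl
        have hlsget : PySem.List.pyGet? (pvTablesB cs).2 (p : Int) = some (lsv cs p) := by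
          rw [htb, PySem.List.pyGet?_natCast, List.getElem?_map, List.getElem?_range (by omega)]
          rfl
        have hwi : ((sbv cs p).toNat : Int) = sbv cs p := Int.toNat_of_nonneg (hsbvnn p)
        have hwitn : (sbv cs p).toNat = i := by omega
        simp only [pvGA, pvFB, hcget, Option.getD_some, hsbget, hlsget, hwitn, hp4',
          if_neg (show ¬ ¬ (0 ≤ (p : Int) ∧ (p : Int) < (n : Int)) by push_cast; omega),
          if_neg hcne, if_pos rfl, zero_add]
        rw [hidx p hpos]
        by_cases hj : j = 0
        · by_cases hX : PySem.Chars.lowerChar ((PySem.List.pyGet? (words[i]?.getD []) 0).getD ' ') = PySem.Chars.lowerChar (cs[p]'(by omega))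
          · simp [hpos, hj, hX]
          · by_cases hY : (words[i]?.getD []).take 2 = ['x', '_'] ∧ cs[p]'(by omega) = 'e'
            · simp [hpos, hj, hX, hY]
            · simp [hpos, hj, hX, hY]
        · by_cases hY : (words[i]?.getD []).take 2 = ['x', '_'] ∧ cs[p]'(by omega) = 'e'
          · simp [hpos, hj, hY]
          · simp [hpos, hj, hY]
      · -- position not in this word's interval: both sides skip it
        have hGnone : pvGA cs words (0 + (i : Int)) iv (j, pos) = none := by
          simp [pvGA, hpos]
        rw [hGnone]
        rcases Classical.em (0 ≤ pos ∧ pos < (n : Int)) with hin | hout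
        · obtain ⟨h0, h1⟩ := hin
          obtain ⟨p, rfl⟩ := Int.eq_ofNat_of_zero_le h0
          have hpn : p < n := by exact_mod_cast h1
          have hcp : cs[p]? = some (cs[p]'(by omega)) := List.getElem?_eq_getElem (by omega)
          have hcget : PySem.List.pyGet? cs (p : Int) = some (cs[p]'(by omega)) := by
            rw [PySem.List.pyGet?_natCast, hcp]
          by_cases hsp : cs[p]'(by omega) = ' '
          · simp [pvFB, hcget, hsp]
          · have hsbget : PySem.List.pyGet? (pvTablesB cs).1 (p : Int) = some (sbv cs p) := by
              rw [htb, PySem.List.pyGet?_natCast, List.getElem?_map, List.getElem?_range (by omega)]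
              rfl
            have hne : (sbv cs p).toNat ≠ i := by
              intro he
              apply hpos
              refine (hmem (p : Int)).mpr ⟨p, rfl, by omega, hpn, ?_, ?_⟩
              · rw [hcp]
                intro hh
                exact hsp (by injection hh)
              · rw [hsbv0]
                have := hsbvnn p
                omega
            simp [pvFB, hcget, hsp, hsbget, hne, show ¬ n ≤ p by omega]
        · have hFnone : pvFB cs words n (pvTablesB cs).1 (pvTablesB cs).2 (j, pos) = none := by
            unfold pvFB
            rw [if_pos hout]
          rw [hFnone]
    simp only [zero_add] at hfm ⊢
    rw [hfm]
    simp
  · -- past the end on both sides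
    have h1 : (pvIntervalsA cs 0)[i]? = none := by
      rw [List.getElem?_eq_none_iff]; omega
    have h2 : (List.replicate (if 0 < n then sbv cs (n - 1) + 1 else 0).toNat ([] : List Int))[i]?
        = none := by
      rw [List.getElem?_eq_none_iff, List.length_replicate]
      omega
    rw [h1, h2]
    rfl

-- ===== VERDICT (by name: the statement is the Claim_ definition above) =====
theorem generate_containment_list_spec : Claim_equal_generate_containment_list := by
  intro t ps _ _
  unfold Spec_generate_containment_list
  exact portA_eq_portB t ps
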